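-- pv_equiv track=rewrite | github.com/naomituohy-a11y/missingemailformatfinder | main.py | choose_best_domain
-- ===== SOURCE A (Python) =====
-- from collections import defaultdict, Counter
--
-- COUNTRY_TLD_PREFS = {
--     "ireland":[".ie",".com"],
--     "united kingdom":[".co.uk",".uk",".com"], "uk":[".co.uk",".uk",".com"], "england":[".co.uk",".uk",".com"],
--     "scotland":[".co.uk",".uk",".com"], "wales":[".co.uk",".uk",".com"],
--     "germany":[".de",".com"], "france":[".fr",".com"], "spain":[".es",".com"], "italy":[".it",".com"],
--     "netherlands":[".nl",".com"], "belgium":[".be",".com"], "sweden":[".se",".com"], "norway":[".no",".com"],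
--     "denmark":[".dk",".com"], "finland":[".fi",".com"], "poland":[".pl",".com"], "portugal":[".pt",".com"],
--     "austria":[".at",".com"], "switzerland":[".ch",".com"], "czech republic":[".cz",".com"], "czechia":[".cz",".com"],
--     "slovakia":[".sk",".com"], "hungary":[".hu",".com"], "romania":[".ro",".com"], "bulgaria":[".bg",".com"],
--     "greece":[".gr",".com"], "turkey":[".com.tr",".tr",".com"],
--     "united states":[".com",".us"], "usa":[".com",".us"], "canada":[".ca",".com"],
--     "australia":[".com.au",".au",".com"], "new zealand":[".co.nz",".nz",".com"]
-- }
--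
-- def choose_best_domain(domains, country_norm):
--     if not domains: return None
--     cnt = Counter(domains)
--     if country_norm and country_norm in COUNTRY_TLD_PREFS:
--         for pref in COUNTRY_TLD_PREFS[country_norm]:
--             cands = [d for d in cnt if d.endswith(pref)]
--             if cands:
--                 return sorted(cands, key=lambda d: (-cnt[d], d))[0]
--     coms = [d for d in cnt if d.endswith(".com")]
--     if coms:
--         return sorted(coms, key=lambda d: (-cnt[d], d))[0]
--     return sorted(cnt.keys(), key=lambda d: (-cnt[d], d))[0]
-- ===== SOURCE B (Python) =====
-- from collections import Counter
--
-- COUNTRY_TLD_PREFS = {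
--     "ireland":[".ie",".com"],
--     "united kingdom":[".co.uk",".uk",".com"], "uk":[".co.uk",".uk",".com"], "england":[".co.uk",".uk",".com"],
--     "scotland":[".co.uk",".uk",".com"], "wales":[".co.uk",".uk",".com"],
--     "germany":[".de",".com"], "france":[".fr",".com"], "spain":[".es",".com"], "italy":[".it",".com"],
--     "netherlands":[".nl",".com"], "belgium":[".be",".com"], "sweden":[".se",".com"], "norway":[".no",".com"],
--     "denmark":[".dk",".com"], "finland":[".fi",".com"], "poland":[".pl",".com"], "portugal":[".pt",".com"],
--     "austria":[".at",".com"], "switzerland":[".ch",".com"], "czech republic":[".cz",".com"], "czechia":[".cz",".com"],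
--     "slovakia":[".sk",".com"], "hungary":[".hu",".com"], "romania":[".ro",".com"], "bulgaria":[".bg",".com"],
--     "greece":[".gr",".com"], "turkey":[".com.tr",".tr",".com"],
--     "united states":[".com",".us"], "usa":[".com",".us"], "canada":[".ca",".com"],
--     "australia":[".com.au",".au",".com"], "new zealand":[".co.nz",".nz",".com"]
-- }
--
-- def choose_best_domain(domains, country_norm):
--     if not domains:
--         return None
--     cnt = Counter(domains)
--     prefs = COUNTRY_TLD_PREFS[country_norm] if (country_norm and country_norm in COUNTRY_TLD_PREFS) else []
--     suffixes = prefs + [".com", ""]  # '' matches everything, so the last group is a catch-all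
--
--     def rank(d):
--         group = next(i for i, s in enumerate(suffixes) if d.endswith(s))
--         return (group, -cnt[d], d)
--
--     return min(cnt, key=rank)
-- ===== Notes on version B (the rewrite author's own statement) =====
-- stated objective: simpler
-- what changed: A's per-preference filter loop plus separate '.com' and catch-all sorting blocks is replaced by one ordered suffix list (country prefs + '.com' + '') and a single min over the counted domains under the lexicographic rank (first matching suffix index, -count, domain).
import Mathlib
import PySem

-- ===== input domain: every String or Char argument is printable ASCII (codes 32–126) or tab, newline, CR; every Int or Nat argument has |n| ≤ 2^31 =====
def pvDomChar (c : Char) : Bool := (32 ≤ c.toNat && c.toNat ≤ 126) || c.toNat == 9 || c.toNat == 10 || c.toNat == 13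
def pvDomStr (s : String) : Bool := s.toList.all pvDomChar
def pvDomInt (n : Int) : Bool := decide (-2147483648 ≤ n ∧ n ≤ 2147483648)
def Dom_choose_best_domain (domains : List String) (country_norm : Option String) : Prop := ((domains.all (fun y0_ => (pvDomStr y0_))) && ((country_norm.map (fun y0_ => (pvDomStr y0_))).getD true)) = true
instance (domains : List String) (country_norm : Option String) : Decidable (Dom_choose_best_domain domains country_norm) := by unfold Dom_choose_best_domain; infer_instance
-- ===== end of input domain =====

-- B replaces A's per-preference filter loop and separate ".com"/catch-all blocks by one ordered
-- suffix list and a single min over all counted domains under a lexicographic rank (objective: simpler).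

def COUNTRY_TLD_PREFS : PySem.Dict String (List String) := PySem.Dict.ofList [
  ("ireland", [".ie", ".com"]),
  ("united kingdom", [".co.uk", ".uk", ".com"]), ("uk", [".co.uk", ".uk", ".com"]), ("england", [".co.uk", ".uk", ".com"]),
  ("scotland", [".co.uk", ".uk", ".com"]), ("wales", [".co.uk", ".uk", ".com"]),
  ("germany", [".de", ".com"]), ("france", [".fr", ".com"]), ("spain", [".es", ".com"]), ("italy", [".it", ".com"]),
  ("netherlands", [".nl", ".com"]), ("belgium", [".be", ".com"]), ("sweden", [".se", ".com"]), ("norway", [".no", ".com"]),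
  ("denmark", [".dk", ".com"]), ("finland", [".fi", ".com"]), ("poland", [".pl", ".com"]), ("portugal", [".pt", ".com"]),
  ("austria", [".at", ".com"]), ("switzerland", [".ch", ".com"]), ("czech republic", [".cz", ".com"]), ("czechia", [".cz", ".com"]),
  ("slovakia", [".sk", ".com"]), ("hungary", [".hu", ".com"]), ("romania", [".ro", ".com"]), ("bulgaria", [".bg", ".com"]),
  ("greece", [".gr", ".com"]), ("turkey", [".com.tr", ".tr", ".com"]),
  ("united states", [".com", ".us"]), ("usa", [".com", ".us"]), ("canada", [".ca", ".com"]),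
  ("australia", [".com.au", ".au", ".com"]), ("new zealand", [".co.nz", ".nz", ".com"])]

-- ===== PORT A =====
-- sorted(cands, key=lambda d: (-cnt[d], d))[0]
def pickA (cnt : PySem.Dict String Int) (cands : List String) : Option String :=
  PySem.List.pyGet? (PySem.List.sorted2 cands (fun d => -(cnt.getD d 0)) (fun d => d) false) 0

-- "for pref in COUNTRY_TLD_PREFS[country_norm]: …" with its early return
def loopA (cnt : PySem.Dict String Int) : List String → Option String
  | [] => none
  | pref :: rest =>
    let cands := cnt.keys.filter (fun d => PySem.Str.endswith d pref)
    if cands ≠ [] then pickA cnt cands else loopA cnt rest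

def choose_best_domain (domains : List String) (country_norm : Option String) : Option String :=
  if domains = [] then none
  else
    let cnt := PySem.Dict.counter domains
    let fromPrefs :=
      match country_norm with
      | some c =>
        if c ≠ "" ∧ COUNTRY_TLD_PREFS.contains c = true then
          loopA cnt ((COUNTRY_TLD_PREFS.get? c).getD [])
        else none
      | none => none
    match fromPrefs with
    | some r => some r
    | none =>
      let coms := cnt.keys.filter (fun d => PySem.Str.endswith d ".com")
      if coms ≠ [] then pickA cnt coms else pickA cnt cnt.keys

-- ===== PORT B =====
-- next(i for i, s in enumerate(suffixes) if d.endswith(s)); total because "" is always in suffixes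
def firstIdx (d : String) : List String → Nat
  | [] => 0
  | s :: rest => if PySem.Str.endswith d s then 0 else firstIdx d rest + 1

-- B's rank tuple (group, -cnt[d], d)
def rankB (suffixes : List String) (cnt : PySem.Dict String Int) (d : String) : Nat × Int × String :=
  (firstIdx d suffixes, -(cnt.getD d 0), d)

-- Python's '<' on these 3-tuples, lexicographically (exact: Nat, Int and String compare as in Python on this domain)
def tupLt (a b : Nat × Int × String) : Bool :=
  a.1 < b.1 || (a.1 == b.1 && (a.2.1 < b.2.1 || (a.2.1 == b.2.1 && a.2.2 < b.2.2)))

-- min(cnt, key=rank), ported by hand step for step: scan the keys, keep the FIRST element whose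
-- key is strictly smaller than the current best's (exactly Python's min; raises only on empty input)
def minByRank (suffixes : List String) (cnt : PySem.Dict String Int) : List String → Option String
  | [] => none
  | x :: rest =>
    some (rest.foldl (fun m y => if tupLt (rankB suffixes cnt y) (rankB suffixes cnt m) then y else m) x)

def choose_best_domain_alt (domains : List String) (country_norm : Option String) : Option String :=
  if domains = [] then none
  else
    let cnt := PySem.Dict.counter domains
    let prefs :=
      match country_norm with
      | some c =>
        if c ≠ "" ∧ COUNTRY_TLD_PREFS.contains c = true then (COUNTRY_TLD_PREFS.get? c).getD []
        else []
      | none => []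
    let suffixes := prefs ++ [".com", ""]
    minByRank suffixes cnt cnt.keys

-- ===== PRECONDITION & SPEC =====
def Spec_choose_best_domain (domains : List String) (country_norm : Option String) (out : Option String) : Prop := out = choose_best_domain_alt domains country_norm
instance (domains : List String) (country_norm : Option String) (out : Option String) : Decidable (Spec_choose_best_domain domains country_norm out) := by unfold Spec_choose_best_domain; infer_instance

-- ===== CLAIM (what is proved, stated in full; the proofs are below) =====
def Claim_equal_choose_best_domain : Prop := ∀ (domains : List String) (country_norm : Option String), Dom_choose_best_domain domains country_norm → Spec_choose_best_domain domains country_norm (choose_best_domain domains country_norm)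

-- ===== LEMMAS AND PROOFS =====

-- the secondary key of A's sorts, as one Lex value
def keyA (cnt : PySem.Dict String Int) (d : String) : Lex (Int × String) :=
  toLex (-(cnt.getD d 0), d)

theorem keyA_inj (cnt : PySem.Dict String Int) {a b : String} (h : keyA cnt a = keyA cnt b) : a = b := by
  have := congrArg (fun x => (ofLex x).2) h
  simpa [keyA] using this

-- proof-side view of B's rank as one lexicographically ordered value
def rankL (S : List String) (cnt : PySem.Dict String Int) (d : String) : Lex (Nat × Lex (Int × String)) :=
  toLex (firstIdx d S, toLex (-(cnt.getD d 0), d))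

theorem rankL_inj (S : List String) (cnt : PySem.Dict String Int) {a b : String}
    (h : rankL S cnt a = rankL S cnt b) : a = b := by
  have := congrArg (fun x => (ofLex (ofLex x).2).2) h
  simpa [rankL] using this

theorem tupLt_iff_rankL (S : List String) (cnt : PySem.Dict String Int) (a b : String) :
    tupLt (rankB S cnt a) (rankB S cnt b) = true ↔ rankL S cnt a < rankL S cnt b := by
  simp [tupLt, rankB, rankL, Prod.Lex.toLex_lt_toLex]

theorem minByRank_spec (S : List String) (cnt : PySem.Dict String Int) (K : List String)
    (hK : K ≠ []) :
    ∃ m, minByRank S cnt K = some m ∧ m ∈ K ∧ ∀ y ∈ K, rankL S cnt m ≤ rankL S cnt y := by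
  rcases K with _ | ⟨x, rest⟩
  · exact absurd rfl hK
  clear hK
  simp only [minByRank]
  induction rest generalizing x with
  | nil => exact ⟨x, rfl, by simp, by simp⟩
  | cons y t ih =>
    rcases ih (if tupLt (rankB S cnt y) (rankB S cnt x) then y else x) with ⟨m, hm, hmem, hmin⟩
    refine ⟨m, ?_, ?_, ?_⟩
    · simpa [List.foldl_cons] using hm
    · by_cases h : tupLt (rankB S cnt y) (rankB S cnt x) = true <;>
        simp [h] at hmem <;> rcases hmem with h' | h' <;> simp [h']
    · have hhead : rankL S cnt m ≤ rankL S cnt (if tupLt (rankB S cnt y) (rankB S cnt x) then y else x) :=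
        hmin _ (by simp)
      intro z hz
      rw [List.mem_cons, List.mem_cons] at hz
      rcases hz with h' | h' | h'
      · subst h'
        by_cases h : tupLt (rankB S cnt y) (rankB S cnt z) = true
        · rw [if_pos h] at hhead
          exact le_trans hhead (le_of_lt ((tupLt_iff_rankL S cnt y z).mp h))
        · rw [if_neg h] at hhead
          exact hhead
      · subst h'
        by_cases h : tupLt (rankB S cnt z) (rankB S cnt x) = true
        · rw [if_pos h] at hhead
          exact hhead
        · rw [if_neg h] at hhead
          have : ¬ rankL S cnt z < rankL S cnt x := fun hlt =>
            h ((tupLt_iff_rankL S cnt z x).mpr hlt)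
          exact le_trans hhead (not_lt.mp this)
      · exact hmin z (by simp [h'])

theorem sorted2_eq_sorted_keyA (cnt : PySem.Dict String Int) (xs : List String) :
    PySem.List.sorted2 xs (fun d => -(cnt.getD d 0)) (fun d => d) false
      = PySem.List.sorted xs (keyA cnt) false := by
  show List.foldl _ [] xs = List.foldl _ [] xs
  congr 1
  funext acc x
  congr 1
  funext a b
  by_cases h1 : -(cnt.getD a 0) < -(cnt.getD b 0)
  · simp [keyA, Prod.Lex.toLex_lt_toLex, h1, asymm h1]
  · by_cases h2 : -(cnt.getD b 0) < -(cnt.getD a 0)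
    · have h3 : ¬(-(cnt.getD a 0) = -(cnt.getD b 0)) := by omega
      simp [keyA, Prod.Lex.toLex_lt_toLex, h3]
      intro h4 _
      omega
    · have h3 : -(cnt.getD a 0) = -(cnt.getD b 0) := le_antisymm (not_lt.mp h2) (not_lt.mp h1)
      simp [keyA, Prod.Lex.toLex_lt_toLex, h3]

theorem pickA_spec (cnt : PySem.Dict String Int) (cands : List String) (h : cands ≠ []) :
    ∃ m, pickA cnt cands = some m ∧ m ∈ cands ∧ ∀ y ∈ cands, keyA cnt m ≤ keyA cnt y := by
  unfold pickA
  rw [sorted2_eq_sorted_keyA]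
  rcases hs : PySem.List.sorted cands (keyA cnt) false with _ | ⟨m, t⟩
  · exact absurd ((PySem.List.sorted_eq_nil_iff cands (keyA cnt) false).mp hs) h
  · refine ⟨m, ?_, ?_, PySem.List.key_head_sorted_le cands (keyA cnt) hs⟩
    · simp [PySem.List.pyGet?, PySem.List.pyIdx?]
    · have : m ∈ PySem.List.sorted cands (keyA cnt) false := by rw [hs]; simp
      exact (PySem.List.mem_sorted cands (keyA cnt) false m).mp this

-- proof-side view of A: first nonempty endswith-group along a suffix list
def genA (cnt : PySem.Dict String Int) (K : List String) : List String → Option String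
  | [] => none
  | s :: rest =>
    let c := K.filter (fun d => PySem.Str.endswith d s)
    if c ≠ [] then pickA cnt c else genA cnt K rest

theorem endswith_empty (d : String) : PySem.Str.endswith d "" = true := by
  simp [PySem.Str.endswith_eq, PySem.Chars.endswith_iff]

theorem loop_tail (cnt : PySem.Dict String Int) (hK : cnt.keys ≠ []) (P : List String) :
    (match loopA cnt P with
     | some r => some r
     | none =>
       if cnt.keys.filter (fun d => PySem.Str.endswith d ".com") ≠ [] then
         pickA cnt (cnt.keys.filter (fun d => PySem.Str.endswith d ".com"))
       else pickA cnt cnt.keys)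
    = genA cnt cnt.keys (P ++ [".com", ""]) := by
  induction P with
  | nil =>
    have hfull : cnt.keys.filter (fun d => PySem.Str.endswith d "") = cnt.keys := by
      apply List.filter_eq_self.mpr; intro a _; exact endswith_empty a
    simp only [loopA, genA, List.nil_append, hfull]
    rw [if_pos hK]
  | cons p P ih =>
    simp only [loopA, genA, List.cons_append]
    by_cases hc : cnt.keys.filter (fun d => PySem.Str.endswith d p) ≠ []
    · obtain ⟨m, hpick, -, -⟩ := pickA_spec cnt _ hc
      rw [if_pos hc, if_pos hc, hpick]
    · rw [if_neg hc, if_neg hc]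
      exact ih

theorem firstIdx_cons_zero {d s : String} (rest : List String) (h : PySem.Str.endswith d s = true) :
    firstIdx d (s :: rest) = 0 := by simp only [firstIdx]; rw [if_pos h]

theorem firstIdx_cons_succ {d s : String} (rest : List String) (h : PySem.Str.endswith d s = false) :
    firstIdx d (s :: rest) = firstIdx d rest + 1 := by
  simp only [firstIdx]; rw [if_neg (by rw [h]; simp)]

theorem gen_eq_min (cnt : PySem.Dict String Int) (K : List String) (hK : K ≠ []) :
    ∀ S, "" ∈ S → genA cnt K S = minByRank S cnt K := by
  intro S
  induction S with
  | nil => intro h; exact absurd h (by simp)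
  | cons s rest ih =>
    intro hmem
    obtain ⟨mB, hmB, hmBmem, hmBmin⟩ := minByRank_spec (s :: rest) cnt K hK
    by_cases hc : K.filter (fun d => PySem.Str.endswith d s) ≠ []
    · -- first group nonempty: A picks there, and mB must live there too
      obtain ⟨mA, hpick, hmAmem, hmAmin⟩ := pickA_spec cnt _ hc
      have hmA_ends : PySem.Str.endswith mA s = true := (List.mem_filter.mp hmAmem).2
      have hmA_K : mA ∈ K := (List.mem_filter.mp hmAmem).1
      have hmA_idx : firstIdx mA (s :: rest) = 0 := firstIdx_cons_zero rest hmA_ends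
      -- mB's group index is 0
      have hle := hmBmin mA hmA_K
      simp only [rankL] at hle
      rw [hmA_idx, Prod.Lex.toLex_le_toLex] at hle
      have hB_idx : firstIdx mB (s :: rest) = 0 := by
        rcases hle with h | h
        · exact absurd h (by omega)
        · exact h.1
      have hB_ends : PySem.Str.endswith mB s = true := by
        by_contra hne
        rw [firstIdx_cons_succ rest (by simpa using hne)] at hB_idx
        omega
      have hmB_grp : mB ∈ K.filter (fun d => PySem.Str.endswith d s) :=
        List.mem_filter.mpr ⟨hmBmem, hB_ends⟩
      -- within the group, mB is keyA-minimal
      have hmB_keymin : ∀ y ∈ K.filter (fun d => PySem.Str.endswith d s), keyA cnt mB ≤ keyA cnt y := by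
        intro y hy
        have hyK : y ∈ K := (List.mem_filter.mp hy).1
        have hy_idx : firstIdx y (s :: rest) = 0 := firstIdx_cons_zero rest (List.mem_filter.mp hy).2
        have := hmBmin y hyK
        simp only [rankL] at this
        rw [hB_idx, hy_idx, Prod.Lex.toLex_le_toLex] at this
        rcases this with h | h
        · exact absurd h (by omega)
        · exact h.2
      have : mA = mB :=
        keyA_inj cnt (le_antisymm (hmAmin mB hmB_grp) (hmB_keymin mA hmAmem))
      simp only [genA]
      rw [if_pos hc, hpick, this, hmB]
    · -- first group empty: drop the suffix on both sides
      rw [not_ne_iff] at hc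
      have hs_ne : s ≠ "" := by
        intro h
        rcases K with _ | ⟨k, K'⟩
        · exact hK rfl
        · have : k ∈ List.filter (fun d => PySem.Str.endswith d s) (k :: K') :=
            List.mem_filter.mpr ⟨by simp, by rw [h]; exact endswith_empty k⟩
          rw [hc] at this; simp at this
      have hrest : "" ∈ rest := by
        rw [List.mem_cons] at hmem
        rcases hmem with h | h
        · exact absurd h.symm hs_ne
        · exact h
      have hnoend : ∀ d ∈ K, PySem.Str.endswith d s = false := by
        intro d hd
        by_contra h
        have : d ∈ K.filter (fun x => PySem.Str.endswith x s) :=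
          List.mem_filter.mpr ⟨hd, by simpa using h⟩
        rw [hc] at this; simp at this
      obtain ⟨m', hm', hm'mem, hm'min⟩ := minByRank_spec rest cnt K hK
      -- m' is also minimal for the longer suffix list
      have hm'min' : ∀ y ∈ K, rankL (s :: rest) cnt m' ≤ rankL (s :: rest) cnt y := by
        intro y hy
        have h1 := firstIdx_cons_succ rest (hnoend m' hm'mem)
        have h2 := firstIdx_cons_succ rest (hnoend y hy)
        have := hm'min y hy
        simp only [rankL] at this ⊢
        rw [Prod.Lex.toLex_le_toLex] at this
        rw [h1, h2, Prod.Lex.toLex_le_toLex]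
        rcases this with h | h
        · exact Or.inl (by omega)
        · exact Or.inr ⟨by omega, h.2⟩
      have heq : mB = m' :=
        rankL_inj (s :: rest) cnt
          (le_antisymm (hmBmin m' hm'mem) (hm'min' mB hmBmem))
      simp only [genA]
      rw [if_neg (not_ne_iff.mpr hc), ih hrest, hm', hmB, heq]

-- ===== VERDICT (by name: the statement is the Claim_ definition above) =====
theorem choose_best_domain_spec : Claim_equal_choose_best_domain := by
  intro domains country_norm _
  unfold Spec_choose_best_domain choose_best_domain choose_best_domain_alt
  by_cases hdom : domains = []
  · simp [hdom]
  · rw [if_neg hdom, if_neg hdom]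
    have hK : (PySem.Dict.counter domains).keys ≠ [] := by
      rcases domains with _ | ⟨d, ds⟩
      · exact absurd rfl hdom
      · intro h
        have : d ∈ (PySem.Dict.counter (d :: ds)).keys := by
          rw [PySem.Dict.keys_counter]
          exact (PySem.Set.mem_ofList _ _).mpr (by simp)
        rw [h] at this; simp at this
    rcases country_norm with _ | c
    · exact (loop_tail (PySem.Dict.counter domains) hK []).trans
        (gen_eq_min _ _ hK ([] ++ [".com", ""]) (by simp))
    · dsimp only []
      by_cases hg : c ≠ "" ∧ COUNTRY_TLD_PREFS.contains c = true
      · rw [if_pos hg, if_pos hg]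
        exact (loop_tail (PySem.Dict.counter domains) hK ((COUNTRY_TLD_PREFS.get? c).getD [])).trans
          (gen_eq_min _ _ hK ((COUNTRY_TLD_PREFS.get? c).getD [] ++ [".com", ""]) (by simp))
      · rw [if_neg hg, if_neg hg]
        exact (loop_tail (PySem.Dict.counter domains) hK []).trans
          (gen_eq_min _ _ hK ([] ++ [".com", ""]) (by simp))
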